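-- pv_equiv track=rewrite | github.com/simon-et-smith/local-sats | isochrones.py | find_isos
-- ===== SOURCE A (Python) =====
-- def find_starts(lines):
--     """
--     Find the index number of all rows where a new isochrone starts
--     Identifier of header is '# Zini'
--     """
--
--     starts = []
--     i = 0
--     for line in lines:
--         if '# Zini' in line:
--             starts.append(i)
--         i+=1
--     return starts
--
-- def find_isos(lines):
--     """
--     for a set of lines with isochrone data tables,
--     return a list of triples which represent the index of the header, start of data, and end of data
--     for each isochrone data set
--     """
--     starts = find_starts(lines)
--
--     isos = []
--
--     first = True
--     for i in range(len(starts)-1, -1, -1):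
--         if first:
--             isos.append([starts[i], starts[i]+1, len(lines)-2])
--             first = False
--         else:
--             isos.append([starts[i], starts[i]+1, starts[i+1]])
--     return isos
-- ===== SOURCE B (Python) =====
-- def find_isos(lines):
--     """One forward pass: pair each header with the next header's index,
--     the last header with len(lines)-2; reversed to match A's order."""
--     isos = []
--     prev = None
--     for i, line in enumerate(lines):
--         if '# Zini' in line:
--             if prev is not None:
--                 isos.append([prev, prev + 1, i])
--             prev = i
--     if prev is not None:
--         isos.append([prev, prev + 1, len(lines) - 2])
--     isos.reverse()
--     return isos
-- ===== Notes on version B (the rewrite author's own statement) =====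
-- stated objective: simpler
-- what changed: Replaces the two-pass scheme (materialise a starts list, then an index loop over range(len(starts)-1,-1,-1) with a first-iteration flag and starts[i]/starts[i+1] lookups) by a single forward enumerate pass that keeps only the previous header index, appending triples as it goes and reversing once at the end.
import Mathlib
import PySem

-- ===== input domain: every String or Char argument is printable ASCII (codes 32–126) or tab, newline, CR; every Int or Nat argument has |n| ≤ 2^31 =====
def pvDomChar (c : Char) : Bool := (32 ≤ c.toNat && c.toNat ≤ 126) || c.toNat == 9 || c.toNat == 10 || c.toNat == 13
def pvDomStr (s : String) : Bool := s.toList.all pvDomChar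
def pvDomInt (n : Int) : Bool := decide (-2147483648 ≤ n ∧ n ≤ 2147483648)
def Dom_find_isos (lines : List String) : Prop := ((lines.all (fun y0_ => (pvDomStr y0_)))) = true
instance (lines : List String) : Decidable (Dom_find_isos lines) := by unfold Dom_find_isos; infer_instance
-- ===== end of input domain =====

-- B replaces A's two passes (collect all header indices, then an index loop backwards
-- over that list with a first-iteration flag) by one forward enumerate pass keeping only
-- the previous header index, reversed once at the end; objective: simpler.

-- ===== PORT A =====
def find_starts (lines : List String) : List Int :=
  (lines.foldl
    (fun (st : List Int × Int) line =>
      (if PySem.Str.isIn "# Zini" line then st.1 ++ [st.2] else st.1, st.2 + 1))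
    ([], 0)).1

def find_isos (lines : List String) : List (List Int) :=
  let starts := find_starts lines
  ((PySem.List.pyRange ((starts.length : Int) - 1) (-1) (-1)).foldl
    (fun (st : List (List Int) × Bool) i =>
      if st.2 then
        (st.1 ++ [[PySem.List.pyGetD starts i 0, PySem.List.pyGetD starts i 0 + 1,
                   (lines.length : Int) - 2]], false)
      else
        (st.1 ++ [[PySem.List.pyGetD starts i 0, PySem.List.pyGetD starts i 0 + 1,
                   PySem.List.pyGetD starts (i + 1) 0]], st.2))
    ([], true)).1

-- ===== PORT B =====
def find_isos_alt (lines : List String) : List (List Int) :=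
  let st := (PySem.List.enumerate lines 0).foldl
    (fun (st : Option Int × List (List Int)) p =>
      if PySem.Str.isIn "# Zini" p.2 then
        (some p.1,
         match st.1 with
         | some prev => st.2 ++ [[prev, prev + 1, p.1]]
         | none => st.2)
      else st)
    (none, [])
  let res :=
    match st.1 with
    | some prev => st.2 ++ [[prev, prev + 1, (lines.length : Int) - 2]]
    | none => st.2
  res.reverse

-- ===== PRECONDITION & SPEC =====
def Spec_find_isos (lines : List String) (out : List (List Int)) : Prop := out = find_isos_alt lines
instance (lines : List String) (out : List (List Int)) : Decidable (Spec_find_isos lines out) := by unfold Spec_find_isos; infer_instance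

-- ===== CLAIM (what is proved, stated in full; the proofs are below) =====
def Claim_equal_find_isos : Prop := ∀ (lines : List String), Dom_find_isos lines → Spec_find_isos lines (find_isos lines)

-- ===== LEMMAS AND PROOFS =====

-- structural list of header indices starting at offset n
def pvStarts (n : Int) : List String → List Int
  | [] => []
  | l :: ls => if PySem.Str.isIn "# Zini" l then n :: pvStarts (n + 1) ls else pvStarts (n + 1) ls

-- forward chain of consecutive-pair triples
def pvChain (p : Int) : List Int → List (List Int)
  | [] => []
  | b :: rest => [p, p + 1, b] :: pvChain b rest

-- last element of p :: rest
def pvLast (p : Int) : List Int → Int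
  | [] => p
  | b :: rest => pvLast b rest

-- A's backwards fold output (after the first iteration), as a Nat recursion
def pvDown (S : List Int) : Nat → List (List Int)
  | 0 => [[S.getD 0 0, S.getD 0 0 + 1, S.getD 1 0]]
  | m + 1 => [S.getD (m + 1) 0, S.getD (m + 1) 0 + 1, S.getD (m + 2) 0] :: pvDown S m

-- abstract result of B's enumerate fold on the list of header indices
def pvG : Option Int × List (List Int) → List Int → Option Int × List (List Int)
  | st, [] => st
  | st, s :: rest =>
      pvG (some s,
           match st.1 with
           | some p => st.2 ++ [[p, p + 1, s]]
           | none => st.2) rest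

theorem pv_find_starts_fold (ls : List String) : ∀ (acc : List Int) (n : Int),
    (ls.foldl
      (fun (st : List Int × Int) line =>
        (if PySem.Str.isIn "# Zini" line then st.1 ++ [st.2] else st.1, st.2 + 1))
      (acc, n)) = (acc ++ pvStarts n ls, n + ls.length) := by
  induction ls with
  | nil => intro acc n; simp [pvStarts]
  | cons l ls ih =>
      intro acc n
      by_cases h : PySem.Str.isIn "# Zini" l
      · simp only [List.foldl_cons, if_pos h, ih, pvStarts]
        refine Prod.ext ?_ ?_
        · simp [List.append_assoc]
        · simp; ring
      · simp only [List.foldl_cons, if_neg h, ih, pvStarts]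
        refine Prod.ext ?_ ?_
        · simp
        · simp; ring

theorem pv_find_starts (lines : List String) : find_starts lines = pvStarts 0 lines := by
  unfold find_starts
  rw [pv_find_starts_fold]
  simp

theorem pv_enum_fold (ls : List String) : ∀ (n : Int) (st : Option Int × List (List Int)),
    ((PySem.List.enumerate ls n).foldl
      (fun (st : Option Int × List (List Int)) p =>
        if PySem.Str.isIn "# Zini" p.2 then
          (some p.1,
           match st.1 with
           | some prev => st.2 ++ [[prev, prev + 1, p.1]]
           | none => st.2)
        else st)
      st) = pvG st (pvStarts n ls) := by
  induction ls with
  | nil => intro n st; simp [PySem.List.enumerate_nil, pvStarts, pvG]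
  | cons l ls ih =>
      intro n st
      rw [PySem.List.enumerate_cons]
      by_cases h : PySem.Str.isIn "# Zini" l
      · simp only [List.foldl_cons, if_pos h, pvStarts, pvG, ih]
      · simp only [List.foldl_cons, if_neg h, pvStarts, ih]

theorem pv_pvG_some (rest : List Int) : ∀ (p : Int) (acc : List (List Int)),
    pvG (some p, acc) rest = (some (pvLast p rest), acc ++ pvChain p rest) := by
  induction rest with
  | nil => intro p acc; simp [pvG, pvLast, pvChain]
  | cons b rest ih =>
      intro p acc
      simp [pvG, pvLast, pvChain, ih, List.append_assoc]

theorem pv_getD_last (rest : List Int) : ∀ (p : Int),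
    (p :: rest).getD rest.length 0 = pvLast p rest := by
  induction rest with
  | nil => intro p; simp [pvLast]
  | cons b rest ih =>
      intro p
      simpa [pvLast] using ih b

theorem pv_down_shift (S : List Int) (p : Int) : ∀ (m : Nat),
    pvDown (p :: S) (m + 1) = pvDown S m ++ [[p, p + 1, S.getD 0 0]] := by
  intro m
  induction m with
  | zero => simp [pvDown]
  | succ k ih =>
      conv_lhs => rw [pvDown]
      rw [ih]
      conv_rhs => rw [pvDown]
      simp

theorem pv_chain_rev (rest' : List Int) : ∀ (p b : Int),
    (pvChain p (b :: rest')).reverse = pvDown (p :: b :: rest') rest'.length := by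
  induction rest' with
  | nil => intro p b; simp [pvChain, pvDown]
  | cons c rest'' ih =>
      intro p b
      have h1 : (pvChain p (b :: c :: rest'')).reverse
          = (pvChain b (c :: rest'')).reverse ++ [[p, p + 1, b]] := by
        simp [pvChain]
      rw [h1, ih b c]
      simp only [List.length_cons]
      rw [pv_down_shift]
      simp

theorem pv_foldA_false (S : List Int) (L : Int) : ∀ (m : Nat) (acc : List (List Int)),
    ((PySem.List.pyRange ((m : Nat) : Int) (-1) (-1)).foldl
      (fun (st : List (List Int) × Bool) i =>
        if st.2 then
          (st.1 ++ [[PySem.List.pyGetD S i 0, PySem.List.pyGetD S i 0 + 1, L - 2]], false)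
        else
          (st.1 ++ [[PySem.List.pyGetD S i 0, PySem.List.pyGetD S i 0 + 1,
                     PySem.List.pyGetD S (i + 1) 0]], st.2))
      (acc, false)) = (acc ++ pvDown S m, false) := by
  intro m
  induction m with
  | zero =>
      intro acc
      rw [PySem.List.pyRange_neg_one_cons (by norm_num)]
      rw [show ((0 : Nat) : Int) - 1 = -1 by norm_num,
          PySem.List.pyRange_neg_one_eq_nil (by norm_num)]
      have e1 : ((0 : Nat) : Int) + 1 = ((1 : Nat) : Int) := by norm_num
      simp [pvDown, PySem.List.pyGetD_ofNat']
  | succ k ih =>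
      intro acc
      have hlt : (-1 : Int) < ((k + 1 : Nat) : Int) := by push_cast; omega
      rw [PySem.List.pyRange_neg_one_cons hlt]
      have e0 : ((k + 1 : Nat) : Int) - 1 = ((k : Nat) : Int) := by push_cast; ring
      rw [e0]
      simp only [List.foldl_cons, Bool.false_eq_true, if_false]
      rw [ih]
      have e1 : ((k + 1 : Nat) : Int) + 1 = ((k + 2 : Nat) : Int) := by push_cast; ring
      rw [e1, PySem.List.pyGetD_natCast, PySem.List.pyGetD_natCast]
      simp [pvDown, List.append_assoc]

-- common normal form of both results, as a function of the header-index list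
def pvNF (lines : List String) : List (List Int) :=
  match pvStarts 0 lines with
  | [] => []
  | p :: rest =>
      [pvLast p rest, pvLast p rest + 1, (lines.length : Int) - 2] :: (pvChain p rest).reverse

theorem pv_alt_eq_NF (lines : List String) : find_isos_alt lines = pvNF lines := by
  unfold find_isos_alt pvNF
  rw [pv_enum_fold]
  cases h : pvStarts 0 lines with
  | nil => simp [pvG]
  | cons p rest =>
      simp only [pvG]
      rw [pv_pvG_some]
      simp

theorem pv_A_eq_NF (lines : List String) : find_isos lines = pvNF lines := by
  unfold find_isos pvNF
  rw [pv_find_starts]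
  cases h : pvStarts 0 lines with
  | nil =>
      dsimp only
      rw [show ((([] : List Int).length : Int) - 1) = -1 by simp]
      rw [PySem.List.pyRange_neg_one_eq_nil (by norm_num)]
      simp
  | cons p rest =>
      dsimp only
      have e0 : (((p :: rest).length : Int)) - 1 = ((rest.length : Nat) : Int) := by simp
      rw [e0, PySem.List.pyRange_neg_one_cons (by omega)]
      have hfirst : PySem.List.pyGetD (p :: rest) ((rest.length : Nat) : Int) 0 = pvLast p rest := by
        rw [PySem.List.pyGetD_natCast, pv_getD_last]
      cases rest with
      | nil =>
          simp only [List.foldl_cons, reduceIte]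
          rw [show (((([] : List Int)).length : Int) - 1) = -1 by simp]
          rw [PySem.List.pyRange_neg_one_eq_nil (by norm_num)]
          simp [pvChain, pvLast]
      | cons b rest' =>
          simp only [List.foldl_cons, reduceIte]
          have e2 : (((b :: rest').length : Nat) : Int) - 1 = ((rest'.length : Nat) : Int) := by
            simp
          rw [e2, pv_foldA_false]
          rw [pv_chain_rev]
          have hfirst' : PySem.List.pyGetD (p :: b :: rest') ((rest'.length : Int) + 1) 0
              = pvLast p (b :: rest') := by
            rw [show ((rest'.length : Int) + 1) = ((((b :: rest').length : Nat)) : Int) by simp]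
            exact hfirst
          simp [hfirst']

-- ===== VERDICT (by name: the statement is the Claim_ definition above) =====
theorem find_isos_spec : Claim_equal_find_isos := by
  intro lines _
  unfold Spec_find_isos
  rw [pv_A_eq_NF, pv_alt_eq_NF]
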